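-- pv_equiv track=rewrite | github.com/rjsengar/leetcode | Easy/Minimum indexed character/minimum-indexed-character.py | minIndexChar
-- ===== SOURCE A (Python) =====
-- def minIndexChar(Str, pat):
--     d={}
--     for i in pat:
--         if i not in d:
--             d[i]=1
--     for i in range(len(Str)):
--         if Str[i] in d:
--             return i
--     return -1
-- ===== SOURCE B (Python) =====
-- def minIndexChar(Str, pat):
--     first = {}
--     for i, c in enumerate(Str):
--         first.setdefault(c, i)
--     best = -1
--     for c in pat:
--         if c in first:
--             j = first[c]
--             if best == -1 or j < best:
--                 best = j
--     return best
-- ===== Notes on version B (the rewrite author's own statement) =====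
-- stated objective: alternative
-- what changed: B builds a first-occurrence index of Str once and takes the minimum index over pat's characters, instead of A's scan of Str against a set built from pat with an early return.
import Mathlib
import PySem

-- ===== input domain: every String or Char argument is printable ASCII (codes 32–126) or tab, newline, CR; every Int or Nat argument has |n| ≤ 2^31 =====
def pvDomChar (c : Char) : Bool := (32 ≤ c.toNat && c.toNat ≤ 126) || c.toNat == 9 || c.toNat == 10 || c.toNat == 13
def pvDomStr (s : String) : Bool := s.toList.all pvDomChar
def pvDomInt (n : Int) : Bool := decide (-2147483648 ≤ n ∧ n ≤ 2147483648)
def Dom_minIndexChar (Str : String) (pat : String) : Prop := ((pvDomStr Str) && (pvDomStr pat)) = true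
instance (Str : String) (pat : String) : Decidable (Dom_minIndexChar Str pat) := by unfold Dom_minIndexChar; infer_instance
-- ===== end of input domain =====

-- B builds a first-occurrence index of Str once and minimises over pat's characters,
-- instead of A's scan of Str against a set built from pat; alternative decomposition, same cost.

-- ===== PORT A =====
-- d = {}; for i in pat: if i not in d: d[i] = 1
def pvBuildD (pat : List Char) : PySem.Dict Char Int :=
  pat.foldl (fun d i => if PySem.Dict.contains d i then d else PySem.Dict.insert d i 1)
    PySem.Dict.empty

-- for i in range(len(Str)): if Str[i] in d: return i  /  return -1
def pvAFind (d : PySem.Dict Char Int) : List Char → Int → Int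
  | [], _ => -1
  | c :: rest, i => if PySem.Dict.contains d c then i else pvAFind d rest (i + 1)

def minIndexChar (Str : String) (pat : String) : Int :=
  pvAFind (pvBuildD pat.toList) Str.toList 0

-- ===== PORT B =====
-- first = {}; for i, c in enumerate(Str): first.setdefault(c, i)
def pvFirstIdx (s : List Char) : PySem.Dict Char Int :=
  (PySem.List.enumerate s 0).foldl (fun d p => PySem.Dict.setdefault d p.2 p.1)
    PySem.Dict.empty

-- best = -1; for c in pat: if c in first: j = first[c]; if best == -1 or j < best: best = j
def minIndexChar_alt (Str : String) (pat : String) : Int :=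
  let first := pvFirstIdx Str.toList
  pat.toList.foldl (fun best c =>
    match PySem.Dict.get? first c with
    | some j => if best = -1 ∨ j < best then j else best
    | none => best) (-1)

-- ===== PRECONDITION & SPEC =====
def Spec_minIndexChar (Str : String) (pat : String) (out : Int) : Prop := out = minIndexChar_alt Str pat
instance (Str : String) (pat : String) (out : Int) : Decidable (Spec_minIndexChar Str pat out) := by unfold Spec_minIndexChar; infer_instance

-- ===== CLAIM (what is proved, stated in full; the proofs are below) =====
def Claim_equal_minIndexChar : Prop := ∀ (Str : String) (pat : String), Dom_minIndexChar Str pat → Spec_minIndexChar Str pat (minIndexChar Str pat)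

-- ===== LEMMAS AND PROOFS =====

-- option-valued minimum (none = "no candidate"), used only in the proofs
def pvOptMin : Option Nat → Option Nat → Option Nat
  | none, b => b
  | some x, none => some x
  | some x, some y => some (min x y)

def pvM (f : Char → Option Nat) : List Char → Option Nat
  | [] => none
  | c :: rest => pvOptMin (f c) (pvM f rest)

def pvEnc : Option Nat → Int
  | none => -1
  | some n => (n : Int)

-- first index of c in s, as B's dict delivers it
def pvF (s : List Char) (c : Char) : Option Nat :=
  if c ∈ s then some (List.idxOf c s) else none

theorem pvOptMin_assoc (a b c : Option Nat) :
    pvOptMin (pvOptMin a b) c = pvOptMin a (pvOptMin b c) := by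
  cases a <;> cases b <;> cases c <;> simp [pvOptMin, Nat.min_assoc]

theorem pvBuildD_contains_aux (p : List Char) (d : PySem.Dict Char Int) (c : Char) :
    (p.foldl (fun d i => if PySem.Dict.contains d i then d else PySem.Dict.insert d i 1) d).contains c
      = (d.contains c || decide (c ∈ p)) := by
  induction p generalizing d with
  | nil => simp
  | cons x xs ih =>
    simp only [List.foldl_cons, ih]
    by_cases hdx : d.contains x = true
    · simp [hdx, List.mem_cons]
      by_cases hcx : c = x
      · subst hcx; simp [hdx]
      · simp [hcx]
    · simp only [hdx, if_neg, Bool.false_eq_true, not_false_iff]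
      simp [PySem.Dict.contains_insert, List.mem_cons]
      by_cases hcx : c = x
      · subst hcx; simp
      · rw [show (c == x) = false from by simpa [beq_eq_false_iff_ne] using hcx]
        simp [hcx]

theorem pvBuildD_contains (p : List Char) (c : Char) :
    (pvBuildD p).contains c = decide (c ∈ p) := by
  simp [pvBuildD, pvBuildD_contains_aux]

theorem pvAFind_eq (d : PySem.Dict Char Int) (s : List Char) (i : Int) :
    pvAFind d s i =
      match s.findIdx? (fun c => d.contains c) with
      | some k => i + (k : Int)
      | none => -1 := by
  induction s generalizing i with
  | nil => simp [pvAFind]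
  | cons x xs ih =>
    rw [List.findIdx?_cons]
    by_cases hx : d.contains x = true
    · simp [pvAFind, hx]
    · have hstep : pvAFind d (x :: xs) i = pvAFind d xs (i + 1) := by
        simp [pvAFind, hx]
      rw [hstep, ih]
      cases h : xs.findIdx? (fun c => d.contains c)
      · simp [hx]
      · simp only [hx, Bool.false_eq_true, if_neg, not_false_iff, Option.map_some]
        push_cast
        ring

theorem pvIdxOf_le_of_getElem {l : List Char} {c : Char} {N : Nat} (hN : N < l.length)
    (h : l[N] = c) : l.idxOf c ≤ N := by
  have hmem : c ∈ l := h ▸ List.getElem_mem hN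
  have ht : c ∈ l.take (N + 1) := by
    have hlen : N < (l.take (N + 1)).length := by simp; omega
    have : (l.take (N + 1))[N]'hlen = c := by simpa [List.getElem_take] using h
    exact this ▸ List.getElem_mem hlen
  have := (List.mem_take_iff_idxOf_lt hmem).1 ht
  omega

theorem pvFirstIdx_aux (s : List Char) (n : Int) (d : PySem.Dict Char Int) (c : Char) :
    ((PySem.List.enumerate s n).foldl (fun d p => PySem.Dict.setdefault d p.2 p.1) d).get? c
      = match d.get? c with
        | some v => some v
        | none => if c ∈ s then some (n + (List.idxOf c s : Int)) else none := by
  induction s generalizing n d with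
  | nil => cases hdc : d.get? c <;> simp [PySem.List.enumerate_nil, hdc]
  | cons x xs ih =>
    rw [PySem.List.enumerate_cons, List.foldl_cons, ih]
    by_cases hcx : c = x
    · subst hcx
      rw [PySem.Dict.get?_setdefault_self]
      cases d.get? c <;> simp
    · rw [PySem.Dict.get?_setdefault_of_ne _ _ hcx]
      cases d.get? c
      · simp only []
        by_cases hm : c ∈ xs
        · have : c ∈ x :: xs := List.mem_cons_of_mem _ hm
          simp only [hm, this, if_true, List.idxOf_cons_ne _ (Ne.symm hcx)]
          push_cast
          ring_nf
        · have : c ∉ x :: xs := by simp [hcx, hm]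
          simp [hm, this]
      · simp

theorem pvFirstIdx_get? (s : List Char) (c : Char) :
    (pvFirstIdx s).get? c = (pvF s c).map (fun n => (n : Int)) := by
  rw [pvFirstIdx, pvFirstIdx_aux]
  by_cases hm : c ∈ s <;> simp [pvF, hm, PySem.Dict.get?_empty]

theorem pvOptMin_none_right (b : Option Nat) : pvOptMin b none = b := by
  cases b <;> rfl

theorem pvStep_eq (b : Option Nat) (j : Nat) :
    (if pvEnc b = -1 ∨ (j : Int) < pvEnc b then (j : Int) else pvEnc b)
      = pvEnc (pvOptMin b (some j)) := by
  cases b with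
  | none => simp [pvEnc, pvOptMin]
  | some n =>
    simp only [pvEnc, pvOptMin]
    by_cases h1 : ((n : Int) = -1 ∨ (j : Int) < (n : Int))
    · rw [if_pos h1, Nat.min_def]
      split_ifs with h2 <;> omega
    · rw [if_neg h1, Nat.min_def]
      split_ifs with h2 <;> omega

theorem pvFold_eq (first : PySem.Dict Char Int) (f : Char → Option Nat)
    (hf : ∀ c, first.get? c = (f c).map (fun n => (n : Int)))
    (l : List Char) (b : Option Nat) :
    l.foldl (fun best c =>
      match PySem.Dict.get? first c with
      | some j => if best = -1 ∨ j < best then j else best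
      | none => best) (pvEnc b) = pvEnc (pvOptMin b (pvM f l)) := by
  induction l generalizing b with
  | nil => simp [pvM, pvOptMin_none_right]
  | cons c rest ih =>
    rw [List.foldl_cons]
    cases hfc : f c with
    | none =>
      have h1 : (match PySem.Dict.get? first c with
          | some j => if pvEnc b = -1 ∨ j < pvEnc b then j else pvEnc b
          | none => pvEnc b) = pvEnc b := by
        simp [hf c, hfc]
      rw [h1, ih b]
      simp [pvM, hfc, pvOptMin]
    | some j =>
      have h1 : (match PySem.Dict.get? first c with
          | some j => if pvEnc b = -1 ∨ j < pvEnc b then j else pvEnc b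
          | none => pvEnc b) = pvEnc (pvOptMin b (some j)) := by
        simp only [hf c, hfc]
        exact pvStep_eq b j
      rw [h1, ih (pvOptMin b (some j))]
      rw [pvM, hfc, pvOptMin_assoc]

theorem pvM_none (f : Char → Option Nat) (l : List Char)
    (h : ∀ c ∈ l, f c = none) : pvM f l = none := by
  induction l with
  | nil => rfl
  | cons x xs ih =>
    rw [pvM, h x (List.mem_cons_self), ih (fun c hc => h c (List.mem_cons_of_mem _ hc))]
    rfl

theorem pvM_mem (f : Char → Option Nat) (l : List Char) (k : Nat)
    (h : pvM f l = some k) : ∃ c ∈ l, f c = some k := by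
  induction l with
  | nil => simp [pvM] at h
  | cons x xs ih =>
    rw [pvM] at h
    cases hfx : f x with
    | none =>
      rw [hfx] at h
      simp only [pvOptMin] at h
      obtain ⟨c, hc, hfc⟩ := ih h
      exact ⟨c, List.mem_cons_of_mem _ hc, hfc⟩
    | some a =>
      rw [hfx] at h
      cases hm : pvM f xs with
      | none =>
        rw [hm] at h
        simp only [pvOptMin, Option.some.injEq] at h
        exact ⟨x, List.mem_cons_self, by rw [hfx, h]⟩
      | some m =>
        rw [hm] at h
        simp only [pvOptMin, Option.some.injEq] at h
        by_cases hle : a ≤ m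
        · refine ⟨x, List.mem_cons_self, ?_⟩
          rw [hfx, ← h, Nat.min_eq_left hle]
        · obtain ⟨c, hc, hfc⟩ := ih (hm.trans (by rw [Nat.min_eq_right (by omega)] at h; rw [h]))
          exact ⟨c, List.mem_cons_of_mem _ hc, hfc⟩

theorem pvM_le (f : Char → Option Nat) (l : List Char) (c : Char) (j : Nat)
    (hc : c ∈ l) (hf : f c = some j) : ∃ k, k ≤ j ∧ pvM f l = some k := by
  induction l with
  | nil => simp at hc
  | cons x xs ih =>
    rcases List.mem_cons.1 hc with hcx | hcxs
    · subst hcx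
      rw [pvM, hf]
      cases hm : pvM f xs with
      | none => exact ⟨j, le_refl _, rfl⟩
      | some m => exact ⟨min j m, Nat.min_le_left _ _, rfl⟩
    · obtain ⟨k, hk, hmk⟩ := ih hcxs
      rw [pvM, hmk]
      cases hfx : f x with
      | none => exact ⟨k, hk, rfl⟩
      | some a => exact ⟨min a k, le_trans (Nat.min_le_right _ _) hk, rfl⟩

theorem pvM_eq_findIdx? (s : List Char) (p : List Char) :
    pvM (pvF s) p = s.findIdx? (fun c => decide (c ∈ p)) := by
  cases h : s.findIdx? (fun c => decide (c ∈ p)) with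
  | none =>
    rw [List.findIdx?_eq_none_iff] at h
    apply pvM_none
    intro c hcp
    rw [pvF]
    by_cases hcs : c ∈ s
    · have := h c hcs
      simp [hcp] at this
    · simp [hcs]
  | some N =>
    rw [List.findIdx?_eq_some_iff_getElem] at h
    obtain ⟨hN, hpred, hmin⟩ := h
    have hc0p : s[N] ∈ p := by simpa using hpred
    have hc0s : s[N] ∈ s := List.getElem_mem hN
    have hf0 : pvF s s[N] = some (s.idxOf s[N]) := by simp [pvF, hc0s]
    obtain ⟨k, hk, hmk⟩ := pvM_le (pvF s) p s[N] _ hc0p hf0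
    have hkN : k ≤ N := le_trans hk (pvIdxOf_le_of_getElem hN rfl)
    obtain ⟨c, hcp, hfc⟩ := pvM_mem (pvF s) p k hmk
    have hcs : c ∈ s := by
      by_contra hcs
      simp [pvF, hcs] at hfc
    have hkc : k = s.idxOf c := by
      simp only [pvF, hcs, if_true, Option.some.injEq] at hfc
      omega
    subst hkc
    have hsk : s[s.idxOf c]'(List.idxOf_lt_length_of_mem hcs) = c :=
      List.getElem_idxOf _
    have hnot : ¬ s.idxOf c < N := by
      intro hlt
      have hm := hmin _ hlt
      rw [hsk] at hm
      simp [hcp] at hm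
    have hEq : s.idxOf c = N := by omega
    rw [hmk, hEq]

-- ===== VERDICT (by name: the statement is the Claim_ definition above) =====
theorem minIndexChar_spec : Claim_equal_minIndexChar := by
  intro Str pat _
  have hB : minIndexChar_alt Str pat = pvEnc (pvM (pvF Str.toList) pat.toList) := by
    have h := pvFold_eq (pvFirstIdx Str.toList) (pvF Str.toList) (pvFirstIdx_get? Str.toList)
      pat.toList none
    simpa [minIndexChar_alt, pvEnc, pvOptMin] using h
  have hA : minIndexChar Str pat = pvEnc (pvM (pvF Str.toList) pat.toList) := by
    unfold minIndexChar
    rw [pvAFind_eq]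
    have hc : (fun c => (pvBuildD pat.toList).contains c)
        = (fun c => decide (c ∈ pat.toList)) := by
      funext c; exact pvBuildD_contains _ _
    rw [hc, ← pvM_eq_findIdx?]
    cases pvM (pvF Str.toList) pat.toList <;> simp [pvEnc]
  unfold Spec_minIndexChar
  rw [hA, hB]
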